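-- pv_equiv track=rewrite | github.com/erelsgl/fairpy | items/partitions.py | greedy_partition
-- ===== SOURCE A (Python) =====
-- from typing import List
--
-- def greedy_partition(num_of_parts:int, item_sizes:List[int])->List[List[int]]:
--     """
--     Partition the numbers using the greedy algorithm: https://en.wikipedia.org/wiki/Greedy_number_partitioning
--     >>> greedy_partition(2, [1,2,3,4,5,6])
--     [[6, 3, 2], [5, 4, 1]]
--     >>> greedy_partition(3, [1,2,3,4,5,6])
--     [[6, 1], [5, 2], [4, 3]]
--     """
--     values = sorted(item_sizes, reverse=True)
--     parts = [ [] for i in range(num_of_parts) ]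
--     sums  = [ 0 for i in range(num_of_parts)  ]
--     for v in values:
--         index_of_part_with_smallest_sum = min(range(num_of_parts), key=lambda i:sums[i])
--         parts[index_of_part_with_smallest_sum].append(v)
--         sums [index_of_part_with_smallest_sum] += v
--     return parts
-- ===== SOURCE B (Python) =====
-- from typing import List
--
-- def greedy_partition(num_of_parts:int, item_sizes:List[int])->List[List[int]]:
--     # Priority-queue variant: keep a list of (sum, part_index) pairs sorted
--     # ascending; pop the head (smallest sum, lowest index on ties), assign the
--     # item, and re-insert the updated pair at its sorted position.
--     parts = [[] for _ in range(num_of_parts)]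
--     queue = [(0, i) for i in range(num_of_parts)]
--     for v in sorted(item_sizes, reverse=True):
--         s, i = queue.pop(0)
--         parts[i].append(v)
--         entry = (s + v, i)
--         j = 0
--         while j < len(queue) and queue[j] < entry:
--             j += 1
--         queue.insert(j, entry)
--     return parts
-- ===== Notes on version B (the rewrite author's own statement) =====
-- stated objective: alternative
-- what changed: A rescans all k part sums with min(range(k), key=...) for every item; B maintains a priority queue - a list of (sum, part_index) pairs kept sorted ascending - popping the head and re-inserting the updated pair at its sorted position.
import Mathlib
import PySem

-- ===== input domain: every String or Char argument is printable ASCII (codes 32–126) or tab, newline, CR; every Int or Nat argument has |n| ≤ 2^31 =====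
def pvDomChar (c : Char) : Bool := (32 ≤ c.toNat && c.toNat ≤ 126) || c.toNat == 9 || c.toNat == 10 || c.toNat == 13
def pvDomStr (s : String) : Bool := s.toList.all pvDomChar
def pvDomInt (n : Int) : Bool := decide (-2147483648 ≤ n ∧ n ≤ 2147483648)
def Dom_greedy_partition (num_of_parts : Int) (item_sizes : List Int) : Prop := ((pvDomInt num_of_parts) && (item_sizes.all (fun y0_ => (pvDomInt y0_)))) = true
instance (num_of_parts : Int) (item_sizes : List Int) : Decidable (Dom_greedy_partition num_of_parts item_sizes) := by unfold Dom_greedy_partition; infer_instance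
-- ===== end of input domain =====

-- B replaces A's per-item scan of all part sums (min over range(k)) by a priority queue:
-- a list of (sum, index) pairs kept sorted ascending, popping the head and re-inserting
-- the updated pair at its sorted position ("alternative" objective; no speed claim).

-- ===== PORT A =====
-- the loop body: pick the index of the part with the smallest sum (min(range(k), key=λi: sums[i]),
-- first minimum on ties), append v there, add v to its sum.  min() of an empty range raises
-- ValueError in Python: the `none` branch (unreachable under Pre_) returns the parts built so far.
def aLoop (k : Int) (values : List Int) (parts : List (List Int)) (sums : List Int) : List (List Int) :=
  match values with
  | [] => parts
  | v :: rest =>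
    match PySem.List.min? (PySem.List.pyRange 0 k 1) (fun i => PySem.List.pyGetD sums i 0) with
    | none => parts
    | some m =>
      aLoop k rest
        (PySem.List.pySetD parts m (PySem.List.pyGetD parts m [] ++ [v]))
        (PySem.List.pySetD sums m (PySem.List.pyGetD sums m 0 + v))

def greedy_partition (num_of_parts : Int) (item_sizes : List Int) : List (List Int) :=
  aLoop num_of_parts
    (PySem.List.sorted item_sizes (fun x => x) true)
    ((PySem.List.pyRange 0 num_of_parts 1).map (fun _ => ([] : List Int)))
    ((PySem.List.pyRange 0 num_of_parts 1).map (fun _ => (0 : Int)))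

-- ===== PORT B =====
-- Python tuple comparison (s1,i1) < (s2,i2)
def pairLtB (a b : Int × Int) : Bool := decide (a.1 < b.1) || (a.1 == b.1 && decide (a.2 < b.2))

-- the while-loop + insert: put e after every queue element < e
def insortPair (q : List (Int × Int)) (e : Int × Int) : List (Int × Int) :=
  match q with
  | [] => [e]
  | x :: xs => if pairLtB x e then x :: insortPair xs e else e :: x :: xs

-- queue.pop(0) on an empty queue raises IndexError in Python: the `[]` branch
-- (unreachable under Pre_) returns the parts built so far.
def bLoop (values : List Int) (parts : List (List Int)) (queue : List (Int × Int)) : List (List Int) :=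
  match values with
  | [] => parts
  | v :: rest =>
    match queue with
    | [] => parts
    | (s, i) :: qt =>
      bLoop rest
        (PySem.List.pySetD parts i (PySem.List.pyGetD parts i [] ++ [v]))
        (insortPair qt (s + v, i))

def greedy_partition_alt (num_of_parts : Int) (item_sizes : List Int) : List (List Int) :=
  bLoop (PySem.List.sorted item_sizes (fun x => x) true)
    ((PySem.List.pyRange 0 num_of_parts 1).map (fun _ => ([] : List Int)))
    ((PySem.List.pyRange 0 num_of_parts 1).map (fun i => ((0 : Int), i)))

-- ===== PRECONDITION & SPEC =====
-- Pre_ excludes num_of_parts ≤ 0 together with a nonempty item list: there A raises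
-- ValueError (min() of an empty range) and B raises IndexError (pop from an empty list).
def Pre_greedy_partition (num_of_parts : Int) (item_sizes : List Int) : Prop :=
  0 < num_of_parts ∨ item_sizes = []

instance (num_of_parts : Int) (item_sizes : List Int) : Decidable (Pre_greedy_partition num_of_parts item_sizes) := by
  unfold Pre_greedy_partition; infer_instance

def pvWitness_greedy_partition : Int × List Int := (2, [1, 2, 3, 4, 5, 6])

def Spec_greedy_partition (num_of_parts : Int) (item_sizes : List Int) (out : List (List Int)) : Prop := out = greedy_partition_alt num_of_parts item_sizes
instance (num_of_parts : Int) (item_sizes : List Int) (out : List (List Int)) : Decidable (Spec_greedy_partition num_of_parts item_sizes out) := by unfold Spec_greedy_partition; infer_instance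

-- ===== CLAIM (what is proved, stated in full; the proofs are below) =====
def Claim_equal_greedy_partition : Prop := ∀ (num_of_parts : Int) (item_sizes : List Int), Dom_greedy_partition num_of_parts item_sizes → Pre_greedy_partition num_of_parts item_sizes → Spec_greedy_partition num_of_parts item_sizes (greedy_partition num_of_parts item_sizes)

-- ===== LEMMAS AND PROOFS =====

-- lexicographic ≤ on (sum, index) pairs, the order B's queue is kept sorted in
def lexLe (a b : Int × Int) : Prop := a.1 < b.1 ∨ (a.1 = b.1 ∧ a.2 ≤ b.2)

-- the multiset B's queue holds: each part's (current sum, index)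
def qModel (sums : List Int) : List (Int × Int) :=
  sums.zipIdx.map (fun p => (p.1, (p.2 : Int)))

lemma lexLe_trans {a b c : Int × Int} (h1 : lexLe a b) (h2 : lexLe b c) : lexLe a c := by
  unfold lexLe at *
  rcases h1 with h1 | ⟨h1, h1'⟩ <;> rcases h2 with h2 | ⟨h2, h2'⟩ <;>
    first
      | exact Or.inl (by omega)
      | exact Or.inr (by omega)

lemma lexLe_of_not_ltB {a b : Int × Int} (h : ¬ pairLtB a b = true) : lexLe b a := by
  unfold pairLtB at h
  unfold lexLe
  simp only [Bool.or_eq_true, Bool.and_eq_true, decide_eq_true_eq, beq_iff_eq, not_or, not_and] at h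
  omega

lemma lexLe_of_ltB {a b : Int × Int} (h : pairLtB a b = true) : lexLe a b := by
  unfold pairLtB at h
  unfold lexLe
  simp only [Bool.or_eq_true, Bool.and_eq_true, decide_eq_true_eq, beq_iff_eq] at h
  omega

lemma insort_perm (q : List (Int × Int)) (e : Int × Int) : (insortPair q e).Perm (e :: q) := by
  induction q with
  | nil => simp [insortPair]
  | cons x xs ih =>
    unfold insortPair
    split
    · exact ((ih.cons x).trans (List.Perm.swap e x xs))
    · exact List.Perm.refl _

lemma insort_pairwise {q : List (Int × Int)} (e : Int × Int) (h : q.Pairwise lexLe) :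
    (insortPair q e).Pairwise lexLe := by
  induction q with
  | nil => simp [insortPair, List.pairwise_cons]
  | cons x xs ih =>
    rcases List.pairwise_cons.mp h with ⟨hx, hxs⟩
    unfold insortPair
    split
    · rename_i hlt
      refine List.pairwise_cons.mpr ⟨?_, ih hxs⟩
      intro y hy
      rcases List.mem_cons.mp ((insort_perm xs e).mem_iff.mp hy) with rfl | hy
      · exact lexLe_of_ltB hlt
      · exact hx y hy
    · rename_i hnlt
      refine List.pairwise_cons.mpr ⟨?_, h⟩
      intro y hy
      rcases List.mem_cons.mp hy with rfl | hy
      · exact lexLe_of_not_ltB hnlt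
      · exact lexLe_trans (lexLe_of_not_ltB hnlt) (hx y hy)

-- ---- facts about qModel ----

lemma qModel_length (sums : List Int) : (qModel sums).length = sums.length := by
  simp [qModel]

lemma qModel_getElem (sums : List Int) (j : Nat) (hj : j < sums.length) :
    (qModel sums)[j]'(by simpa [qModel_length] using hj) = (sums[j], (j : Int)) := by
  simp [qModel]

lemma qModel_mem {sums : List Int} {s i : Int} (h : (s, i) ∈ qModel sums) :
    ∃ j : Nat, ∃ hj : j < sums.length, i = (j : Int) ∧ s = sums[j] := by
  unfold qModel at h
  rcases List.mem_map.mp h with ⟨⟨a, j⟩, hmem, heq⟩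
  have h1 : a = s := congrArg Prod.fst heq
  have h2 : (j : Int) = i := congrArg Prod.snd heq
  subst h1
  subst h2
  rcases List.getElem?_eq_some_iff.mp (List.mk_mem_zipIdx_iff_getElem?.mp hmem) with ⟨hlt, hval⟩
  exact ⟨j, hlt, rfl, hval.symm⟩

lemma qModel_set (sums : List Int) (n : Nat) (x : Int) (_hn : n < sums.length) :
    qModel (sums.set n x) = (qModel sums).set n (x, (n : Int)) := by
  apply List.ext_getElem
  · simp [qModel_length]
  · intro j h1 h2
    have hjs : j < sums.length := by simpa [qModel_length] using h1
    rw [qModel_getElem (sums.set n x) j (by simpa using hjs)]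
    simp only [List.getElem_set]
    split_ifs with hj
    · subst hj; rfl
    · rw [qModel_getElem sums j hjs]

-- pulling the n-th pair of the model to the front is a permutation
lemma qModel_perm (sums : List Int) (n : Nat) (hn : n < sums.length) :
    (qModel sums).Perm
      ((sums[n], (n : Int)) :: ((qModel sums).take n ++ (qModel sums).drop (n + 1))) := by
  have hq : n < (qModel sums).length := by rw [qModel_length]; exact hn
  conv_lhs => rw [← List.take_append_drop n (qModel sums), ← List.getElem_cons_drop hq]
  rw [qModel_getElem sums n hn]
  exact List.perm_middle

lemma set_perm (l : List (Int × Int)) (n : Nat) (y : Int × Int) (hn : n < l.length) :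
    (l.set n y).Perm (y :: (l.take n ++ l.drop (n + 1))) := by
  rw [List.set_eq_take_cons_drop y hn]
  exact List.perm_middle

-- ---- first-minimum characterisation of A's  min(range(k), key=λi: sums[i]) ----

lemma min?_singleton (key : Int → Int) (a : Int) : PySem.List.min? [a] key = some a := by
  simp [PySem.List.min?]

lemma min?_cons_cons (key : Int → Int) (a x : Int) (t : List Int) :
    PySem.List.min? (a :: x :: t) key =
      if key x < key a then PySem.List.min? (x :: t) key else PySem.List.min? (a :: t) key := by
  simp only [PySem.List.min?, List.foldl_cons]
  split_ifs with h
  · simp [h]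
  · simp

lemma min?_first (key : Int → Int) :
    ∀ (t : List Int) (a m : Int),
      PySem.List.min? (a :: t) key = some m →
      (m = a ∧ ∀ y ∈ t, key a ≤ key y) ∨
      (∃ pre post, t = pre ++ m :: post ∧ key m < key a ∧
        (∀ y ∈ pre, key m < key y) ∧ (∀ y ∈ post, key m ≤ key y)) := by
  intro t
  induction t with
  | nil =>
    intro a m h
    rw [min?_singleton] at h
    exact Or.inl ⟨(Option.some.injEq _ _ ▸ h).symm, by simp⟩
  | cons x t ih =>
    intro a m h
    rw [min?_cons_cons] at h
    by_cases hx : key x < key a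
    · rw [if_pos hx] at h
      rcases ih x m h with ⟨rfl, hall⟩ | ⟨pre, post, hdec, hlt, hpre, hpost⟩
      · exact Or.inr ⟨[], t, rfl, hx, by simp, hall⟩
      · refine Or.inr ⟨x :: pre, post, by rw [hdec]; rfl, lt_trans hlt hx, ?_, hpost⟩
        intro y hy
        rcases List.mem_cons.mp hy with rfl | hy
        · exact hlt
        · exact hpre y hy
    · rw [if_neg hx] at h
      rcases ih a m h with ⟨rfl, hall⟩ | ⟨pre, post, hdec, hlt, hpre, hpost⟩
      · refine Or.inl ⟨rfl, ?_⟩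
        intro y hy
        rcases List.mem_cons.mp hy with rfl | hy
        · omega
        · exact hall y hy
      · refine Or.inr ⟨x :: pre, post, by rw [hdec]; rfl, hlt, ?_, hpost⟩
        intro y hy
        rcases List.mem_cons.mp hy with rfl | hy
        · omega
        · exact hpre y hy

-- the result m of A's min: in range, minimal, and strictly below every earlier index
lemma argmin_first (k : Int) (hk : 0 < k) (key : Int → Int) (m : Int)
    (h : PySem.List.min? (PySem.List.pyRange 0 k 1) key = some m) :
    0 ≤ m ∧ m < k ∧ (∀ j, 0 ≤ j → j < k → key m ≤ key j) ∧
      (∀ j, 0 ≤ j → j < m → key m < key j) := by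
  have hcons : PySem.List.pyRange 0 k 1 = 0 :: PySem.List.pyRange (0 + 1) k 1 :=
    PySem.List.pyRange_one_cons hk
  rw [hcons] at h
  have hpw : (PySem.List.pyRange 0 k 1).Pairwise (· < ·) :=
    PySem.List.pairwise_lt_pyRange_one 0 k
  rcases min?_first key _ 0 m h with ⟨rfl, hall⟩ | ⟨pre, post, hdec, hlt0, hpre, hpost⟩
  · refine ⟨le_refl 0, hk, ?_, ?_⟩
    · intro j h0 hj
      rcases eq_or_lt_of_le h0 with rfl | h0'
      · exact le_refl _
      · exact hall j (PySem.List.mem_pyRange_one.mpr ⟨by omega, hj⟩)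
    · intro j h0 hj; omega
  · have hfull : PySem.List.pyRange 0 k 1 = (0 :: pre) ++ m :: post := by
      rw [hcons, hdec]; rfl
    have hmmem : m ∈ PySem.List.pyRange 0 k 1 := by
      rw [hfull]; exact List.mem_append_right _ (List.mem_cons_self)
    have hrange := PySem.List.mem_pyRange_one.mp hmmem
    rw [hfull] at hpw
    rcases List.pairwise_append.mp hpw with ⟨_, hpwR, _⟩
    have hmpost : ∀ y ∈ post, m < y := (List.pairwise_cons.mp hpwR).1
    refine ⟨hrange.1, hrange.2, ?_, ?_⟩
    · intro j h0 hj
      have hjmem : j ∈ (0 :: pre) ++ m :: post := by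
        rw [← hfull]; exact PySem.List.mem_pyRange_one.mpr ⟨h0, hj⟩
      rcases List.mem_append.mp hjmem with hj1 | hj2
      · rcases List.mem_cons.mp hj1 with rfl | hj1
        · exact le_of_lt hlt0
        · exact le_of_lt (hpre j hj1)
      · rcases List.mem_cons.mp hj2 with rfl | hj2
        · exact le_refl _
        · exact hpost j hj2
    · intro j h0 hjm
      have hjk : j < k := by omega
      have hjmem : j ∈ (0 :: pre) ++ m :: post := by
        rw [← hfull]; exact PySem.List.mem_pyRange_one.mpr ⟨h0, hjk⟩
      rcases List.mem_append.mp hjmem with hj1 | hj2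
      · rcases List.mem_cons.mp hj1 with rfl | hj1
        · exact hlt0
        · exact hpre j hj1
      · rcases List.mem_cons.mp hj2 with rfl | hj2
        · omega
        · exact absurd (hmpost j hj2) (by omega)

-- ---- the main loop invariant ----

lemma loop_eq (k : Int) (hk : 0 < k) (values : List Int) :
    ∀ (sums : List Int) (queue : List (Int × Int)) (parts : List (List Int)),
      (sums.length : Int) = k →
      queue.Pairwise lexLe →
      queue.Perm (qModel sums) →
      aLoop k values parts sums = bLoop values parts queue := by
  induction values with
  | nil => intro sums queue parts _ _ _; rfl
  | cons v rest ih =>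
    intro sums queue parts hlen hsort hperm
    -- A's side: min over the nonempty range succeeds
    have hne : PySem.List.pyRange 0 k 1 ≠ [] := by
      intro hnil
      have hl := PySem.List.length_pyRange_one 0 k
      rw [hnil] at hl
      simp at hl
      omega
    obtain ⟨m, hm⟩ : ∃ m, PySem.List.min? (PySem.List.pyRange 0 k 1)
        (fun i => PySem.List.pyGetD sums i 0) = some m := by
      rcases hopt : PySem.List.min? (PySem.List.pyRange 0 k 1)
        (fun i => PySem.List.pyGetD sums i 0) with _ | m
      · exact absurd ((PySem.List.min?_eq_none_iff _ _).mp hopt) hne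
      · exact ⟨m, rfl⟩
    obtain ⟨hm0, hmk, hmin, hfirst⟩ := argmin_first k hk _ m hm
    have hmn : m.toNat < sums.length := by omega
    -- key values are just the entries of sums
    have hkeym : PySem.List.pyGetD sums m 0 = sums[m.toNat]'hmn :=
      PySem.List.pyGetD_eq_getElem sums 0 hm0 (by omega)
    -- B's side: the queue is nonempty
    have hqlen : queue.length = sums.length := by
      rw [hperm.length_eq, qModel_length]
    obtain ⟨⟨s, i⟩, qt, rfl⟩ : ∃ e qt, queue = e :: qt := by
      rcases queue with _ | ⟨e, qt⟩
      · exfalso; simp at hqlen; omega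
      · exact ⟨e, qt, rfl⟩
    have hheadmem : (s, i) ∈ qModel sums := hperm.mem_iff.mp (List.mem_cons_self)
    obtain ⟨ji, hji, rfl, rfl⟩ := qModel_mem hheadmem
    have hkeyji : PySem.List.pyGetD sums ((ji : Int)) 0 = sums[ji] := by
      rw [PySem.List.pyGetD_natCast]
      exact List.getD_eq_getElem sums 0 hji
    -- the head of the sorted queue is exactly A's first minimum
    have hmmem : (sums[m.toNat], (m.toNat : Int)) ∈ ((sums[ji], (ji : Int)) :: qt) := by
      apply hperm.mem_iff.mpr
      rw [← qModel_getElem sums m.toNat hmn]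
      exact List.getElem_mem _
    have hjik : (ji : Int) < k := by omega
    have hmins : sums[m.toNat] ≤ sums[ji] := by
      have hmj := hmin (ji : Int) (by omega) hjik
      rwa [hkeym, hkeyji] at hmj
    have hieq : (ji : Int) = m := by
      rcases List.mem_cons.mp hmmem with heq | hmem
      · have h2 : ((m.toNat : Nat) : Int) = (ji : Int) := congrArg Prod.snd heq
        omega
      · have hle : lexLe (sums[ji], (ji : Int)) (sums[m.toNat], (m.toNat : Int)) :=
          (List.pairwise_cons.mp hsort).1 _ hmem
        unfold lexLe at hle
        simp only at hle
        by_contra hne'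
        have hjim : (ji : Int) < m := by
          rcases hle with hle | ⟨_, hle⟩ <;> omega
        have hstrict := hfirst (ji : Int) (by omega) hjim
        rw [hkeym, hkeyji] at hstrict
        rcases hle with hle | ⟨hle, _⟩ <;> omega
    -- unfold one step of both loops
    simp only [aLoop, bLoop, hm]
    rw [← hieq, hkeyji]
    -- apply the induction hypothesis to the updated state
    apply ih
    · simp only [PySem.List.pySetD_natCast, List.length_set]
      exact hlen
    · exact insort_pairwise _ ((List.pairwise_cons.mp hsort).2)
    · have htail : qt.Perm ((qModel sums).take ji ++ (qModel sums).drop (ji + 1)) :=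
        (hperm.trans (qModel_perm sums ji hji)).cons_inv
      rw [PySem.List.pySetD_natCast, qModel_set sums ji (sums[ji] + v) hji]
      refine (insort_perm qt (sums[ji] + v, (ji : Int))).trans ?_
      refine List.Perm.trans ?_
        (set_perm (qModel sums) ji (sums[ji] + v, (ji : Int))
          (by rw [qModel_length]; exact hji)).symm
      exact List.Perm.cons _ htail

-- initial state: B's queue equals the model of A's all-zero sums, and is sorted
lemma init_queue_eq (k : Int) :
    (PySem.List.pyRange 0 k 1).map (fun i => ((0 : Int), i)) =
      qModel ((PySem.List.pyRange 0 k 1).map (fun _ => (0 : Int))) := by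
  apply List.ext_getElem
  · simp [qModel_length]
  · intro j h1 h2
    simp only [List.getElem_map]
    rw [qModel_getElem _ j (by simpa using h1)]
    simp [PySem.List.getElem_pyRange_one]

lemma init_queue_sorted (k : Int) :
    ((PySem.List.pyRange 0 k 1).map (fun i => ((0 : Int), i))).Pairwise lexLe := by
  rw [List.pairwise_map]
  apply List.Pairwise.imp _ (PySem.List.pairwise_lt_pyRange_one 0 k)
  intro a b hab
  exact Or.inr ⟨rfl, le_of_lt hab⟩

-- ===== VERDICT (by name: the statement is the Claim_ definition above) =====
theorem greedy_partition_spec : Claim_equal_greedy_partition := by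
  intro k xs _ hpre
  unfold Spec_greedy_partition greedy_partition greedy_partition_alt
  rcases hpre with hk | rfl
  · apply loop_eq k hk
    · simp [PySem.List.length_pyRange_one]; omega
    · exact init_queue_sorted k
    · rw [init_queue_eq k]
  · have hnil : PySem.List.sorted ([] : List Int) (fun x => x) true = [] :=
      (PySem.List.sorted_eq_nil_iff _ _ _).mpr rfl
    rw [hnil]
    rfl
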